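-- pv_equiv track=rewrite | github.com/kudeng/Algorithm_practice | perfect_keyboard.py | isovertwo
-- ===== SOURCE A (Python) =====
-- def isovertwo(s):
--     d = {}
--     for i in range(len(s)):
--         if s[i] not in d:
--             d[s[i]] = ''
--         d[s[i]] += s[i-1:i]
--         d[s[i]] += s[i+1:i+2]
--     for k in d:
--         s = set(d[k])
--         if len(s)>2:
--             return False
--     return True
-- ===== SOURCE B (Python) =====
-- def isovertwo(s):
--     edges = list(zip(s, s[1:]))
--     return all(
--         len({b for a, b in edges if a == c} | {a for a, b in edges if b == c}) <= 2
--         for c in set(s))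
-- ===== Notes on version B (the rewrite author's own statement) =====
-- stated objective: alternative
-- what changed: Replaces A's per-position loop accumulating left/right slices into a dict of neighbor strings by a dict-free formulation: materialize the adjacent-pair list once, then for each distinct character compute its right- and left-neighbor sets by two filtering comprehensions over that edge list and check the union has at most 2 elements.
import Mathlib
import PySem

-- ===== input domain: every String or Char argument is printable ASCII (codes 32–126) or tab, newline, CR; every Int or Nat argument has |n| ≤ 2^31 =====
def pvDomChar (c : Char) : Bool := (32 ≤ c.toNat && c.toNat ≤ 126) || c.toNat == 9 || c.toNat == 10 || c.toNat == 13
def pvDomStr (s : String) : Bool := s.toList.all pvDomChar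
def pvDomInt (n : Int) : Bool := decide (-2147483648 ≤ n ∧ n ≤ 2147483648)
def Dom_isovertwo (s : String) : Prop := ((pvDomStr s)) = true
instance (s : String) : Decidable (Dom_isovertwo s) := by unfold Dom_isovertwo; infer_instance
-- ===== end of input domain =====

-- B drops A's incrementally-built dict of neighbor strings: it builds the adjacent-pair list once
-- and, for each distinct character, computes its left/right neighbor sets by filtering that list
-- (objective: alternative decomposition, not claimed faster).

-- ===== PORT A =====
-- one iteration of A's `for i in range(len(s))` loop (d[s[i]] gets s[i-1:i] then s[i+1:i+2])
def pvStepA (l : List Char) (d : PySem.Dict Char (List Char)) (i : Int) : PySem.Dict Char (List Char) :=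
  let c := (PySem.List.pyGet? l i).getD ' '   -- i ranges over range(len(s)), always in range
  let d := if d.contains c then d else d.insert c ([] : List Char)
  let d := d.modify c [] (fun v => v ++ PySem.List.slice l (some (i - 1)) (some i))
  d.modify c [] (fun v => v ++ PySem.List.slice l (some (i + 1)) (some (i + 2)))

def isovertwo (s : String) : Bool :=
  let l := s.toList
  let d := (PySem.List.pyRange 0 (l.length : Int)).foldl (pvStepA l) PySem.Dict.empty
  -- `for k in d: if len(set(d[k])) > 2: return False` then `return True`
  d.keys.all (fun k => !(2 < PySem.Set.len (PySem.Set.ofList (d.getD k []))))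

-- ===== PORT B =====
def isovertwo_alt (s : String) : Bool :=
  let l := s.toList
  let edges := l.zip (PySem.List.slice l (some 1) none)
  (PySem.Set.ofList l).all (fun c =>
    PySem.Set.len (PySem.Set.union
      (PySem.Set.ofList ((edges.filter (fun p => p.1 == c)).map (fun p => p.2)))
      (PySem.Set.ofList ((edges.filter (fun p => p.2 == c)).map (fun p => p.1)))) ≤ 2)

-- ===== PRECONDITION & SPEC =====
def Spec_isovertwo (s : String) (out : Bool) : Prop := out = isovertwo_alt s
instance (s : String) (out : Bool) : Decidable (Spec_isovertwo s out) := by unfold Spec_isovertwo; infer_instance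

-- ===== CLAIM (what is proved, stated in full; the proofs are below) =====
def Claim_equal_isovertwo : Prop := ∀ (s : String), Dom_isovertwo s → Spec_isovertwo s (isovertwo s)

-- ===== LEMMAS AND PROOFS =====

-- the list of neighbors char `c` collects over a suffix, `prev` being the char just before it
def pvNb (prev : Option Char) (c : Char) : List Char → List Char
  | [] => []
  | x :: t => (if x = c then prev.toList ++ t.take 1 else []) ++ pvNb (some x) c t

-- what one A-iteration contributes to d[c]
def pvTermA (l : List Char) (c : Char) (i : Int) : List Char :=
  if (PySem.List.pyGet? l i).getD ' ' = c then
    PySem.List.slice l (some (i - 1)) (some i) ++ PySem.List.slice l (some (i + 1)) (some (i + 2))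
  else []

-- the neighbors one adjacent pair contributes to c's neighbor list
def pvTermB (c : Char) (p : Char × Char) : List Char :=
  (if p.1 = c then [p.2] else []) ++ (if p.2 = c then [p.1] else [])

theorem pvSlice_neg_one_zero {α : Type} (l : List α) :
    PySem.List.slice l (some (-1)) (some 0) = [] := by
  simp [PySem.List.slice]

theorem pvStepA_getD (l : List Char) (d : PySem.Dict Char (List Char)) (i : Int) (c : Char) :
    (pvStepA l d i).getD c [] = d.getD c [] ++ pvTermA l c i := by
  unfold pvStepA pvTermA
  by_cases hc : (PySem.List.pyGet? l i).getD ' ' = c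
  · rw [hc]
    by_cases hd : d.contains c
    · simp [hd, PySem.Dict.getD_modify_self, List.append_assoc]
    · simp [hd, PySem.Dict.getD_modify_self, PySem.Dict.getD_insert_self,
        PySem.Dict.getD_of_not_contains d [] (by simpa using hd)]
  · have hne : c ≠ (PySem.List.pyGet? l i).getD ' ' := fun h => hc h.symm
    simp only [PySem.Dict.getD_modify, if_neg hne]
    split_ifs with hd
    · simp
    · simp [PySem.Dict.getD_insert, hne]

theorem pvFoldA_getD (l : List Char) (c : Char) :
    ∀ (idxs : List Int) (d : PySem.Dict Char (List Char)),
      (idxs.foldl (pvStepA l) d).getD c [] = d.getD c [] ++ idxs.flatMap (pvTermA l c)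
  | [], d => by simp
  | i :: idxs, d => by
    simp only [List.foldl_cons, List.flatMap_cons]
    rw [pvFoldA_getD l c idxs (pvStepA l d i), pvStepA_getD, List.append_assoc]

theorem pvMem_keys_stepA (l : List Char) (d : PySem.Dict Char (List Char)) (i : Int) (k : Char) :
    k ∈ (pvStepA l d i).keys ↔ k = (PySem.List.pyGet? l i).getD ' ' ∨ k ∈ d.keys := by
  unfold pvStepA
  simp only [PySem.Dict.keys_modify, PySem.Dict.mem_keys_insert]
  split_ifs with hd
  · tauto
  · simp only [PySem.Dict.mem_keys_insert]
    tauto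

theorem pvMem_keys_foldA (l : List Char) (k : Char) :
    ∀ (idxs : List Int) (d : PySem.Dict Char (List Char)),
      k ∈ (idxs.foldl (pvStepA l) d).keys ↔
        k ∈ d.keys ∨ ∃ i ∈ idxs, (PySem.List.pyGet? l i).getD ' ' = k
  | [], d => by simp
  | i :: idxs, d => by
    rw [List.foldl_cons, pvMem_keys_foldA l k idxs (pvStepA l d i), pvMem_keys_stepA]
    simp only [List.mem_cons]
    constructor
    · rintro ((h | h) | ⟨j, hj, hjk⟩)
      · exact Or.inr ⟨i, Or.inl rfl, h.symm⟩
      · exact Or.inl h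
      · exact Or.inr ⟨j, Or.inr hj, hjk⟩
    · rintro (h | ⟨j, (rfl | hj), hjk⟩)
      · exact Or.inl (Or.inr h)
      · exact Or.inl (Or.inl hjk.symm)
      · exact Or.inr ⟨j, hj, hjk⟩

theorem pvLeftSlice (pre : List Char) (x : Char) (t : List Char) :
    PySem.List.slice (pre ++ x :: t) (some (((pre.length : Nat) : Int) - 1)) (some ((pre.length : Nat) : Int))
      = pre.getLast?.toList := by
  cases hpre : pre with
  | nil => simpa using pvSlice_neg_one_zero (x :: t)
  | cons a q =>
    have hne : pre ≠ [] := by simp [hpre]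
    subst hpre
    have h1 : (((a :: q).length : Nat) : Int) - 1 = ((q.length : Nat) : Int) := by
      simp
    rw [h1, show (((a :: q).length : Nat) : Int) = ((q.length + 1 : Nat) : Int) by simp,
      PySem.List.slice_natCast]
    have hdrop : (a :: q ++ x :: t).drop q.length = (a :: q).drop q.length ++ x :: t :=
      List.drop_append_of_le_length (by simp)
    have hlast : (a :: q).drop q.length = [(a :: q).getLast hne] := by
      have := List.drop_length_sub_one (l := a :: q) hne
      simpa using this
    rw [hdrop, hlast]
    simp [List.getLast?_eq_some_getLast hne]

theorem pvRightSlice (pre : List Char) (x : Char) (t : List Char) :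
    PySem.List.slice (pre ++ x :: t) (some (((pre.length : Nat) : Int) + 1)) (some (((pre.length : Nat) : Int) + 2))
      = t.take 1 := by
  rw [show ((pre.length : Nat) : Int) + 1 = ((pre.length + 1 : Nat) : Int) by push_cast; ring,
      show ((pre.length : Nat) : Int) + 2 = ((pre.length + 2 : Nat) : Int) by push_cast; ring,
      PySem.List.slice_natCast]
  rw [List.append_cons, List.drop_append_of_le_length (by simp)]
  simp

theorem pvGetMid (pre : List Char) (x : Char) (t : List Char) :
    PySem.List.pyGet? (pre ++ x :: t) ((pre.length : Nat) : Int) = some x := by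
  rw [PySem.List.pyGet?_natCast]
  simp

-- A's per-position contributions, summed over the indices of the suffix, are exactly pvNb
theorem pvFlatA_eq_nb : ∀ (t pre : List Char) (c : Char),
    ((List.range t.length).map (fun j => ((pre.length + j : Nat) : Int))).flatMap (pvTermA (pre ++ t) c)
      = pvNb pre.getLast? c t
  | [], pre, c => by simp [pvNb]
  | x :: t, pre, c => by
    rw [List.length_cons, List.range_succ_eq_map]
    simp only [List.map_cons, List.map_map, List.flatMap_cons, Nat.add_zero, Function.comp_def]
    have hterm : pvTermA (pre ++ x :: t) c ((pre.length : Nat) : Int)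
        = if x = c then pre.getLast?.toList ++ t.take 1 else [] := by
      unfold pvTermA
      rw [pvGetMid, pvLeftSlice, pvRightSlice]
      simp
    have hfun : (fun j => ((pre.length + Nat.succ j : Nat) : Int))
        = (fun j => (((pre ++ [x]).length + j : Nat) : Int)) := by
      funext j
      congr 1
      simp
      omega
    have hL : pre ++ x :: t = (pre ++ [x]) ++ t := by simp
    rw [hterm, hfun, hL, pvFlatA_eq_nb t (pre ++ [x]) c, List.getLast?_concat]
    simp [pvNb]

-- membership in pvNb ↔ being an endpoint partner of c in some adjacent pair
theorem pvFlatB_eq_nb : ∀ (t : List Char) (x c : Char),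
    ((x :: t).zip t).flatMap (pvTermB c) = (if x = c then t.take 1 else []) ++ pvNb (some x) c t
  | [], x, c => by simp [pvNb]
  | y :: t, x, c => by
    rw [List.zip_cons_cons, List.flatMap_cons, pvFlatB_eq_nb t y c]
    show pvTermB c (x, y) ++ _ = _ ++ ((if y = c then (some x).toList ++ t.take 1 else []) ++ pvNb (some y) c t)
    unfold pvTermB
    by_cases h1 : x = c <;> by_cases h2 : y = c
    all_goals simp [h1, h2]

theorem pvZipFlatB_eq_nb (l : List Char) (c : Char) :
    (l.zip l.tail).flatMap (pvTermB c) = pvNb none c l := by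
  cases l with
  | nil => simp [pvNb]
  | cons x t => rw [List.tail_cons, pvFlatB_eq_nb]; simp [pvNb]

theorem pvMem_nb (l : List Char) (c x : Char) :
    x ∈ pvNb none c l ↔ (c, x) ∈ l.zip l.tail ∨ (x, c) ∈ l.zip l.tail := by
  rw [← pvZipFlatB_eq_nb, List.mem_flatMap]
  constructor
  · rintro ⟨p, hp, hx⟩
    unfold pvTermB at hx
    rcases List.mem_append.mp hx with h | h
    · rw [show p = (c, x) from by
        rcases p with ⟨a, b⟩
        by_cases h1 : a = c <;> simp [h1] at h <;> simp [h1, h]] at hp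
      exact Or.inl hp
    · rw [show p = (x, c) from by
        rcases p with ⟨a, b⟩
        by_cases h2 : b = c <;> simp [h2] at h <;> simp [h2, h]] at hp
      exact Or.inr hp
  · rintro (h | h)
    · exact ⟨(c, x), h, by simp [pvTermB]⟩
    · exact ⟨(x, c), h, by simp [pvTermB]⟩

-- membership in B's union of filtered sets: same characterization
theorem pvMem_bset (edges : List (Char × Char)) (c x : Char) :
    x ∈ PySem.Set.union
      (PySem.Set.ofList ((edges.filter (fun p => p.1 == c)).map (fun p => p.2)))
      (PySem.Set.ofList ((edges.filter (fun p => p.2 == c)).map (fun p => p.1)))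
      ↔ (c, x) ∈ edges ∨ (x, c) ∈ edges := by
  rw [PySem.Set.mem_union]
  simp only [PySem.Set.mem_ofList, List.mem_map, List.mem_filter]
  constructor
  · rintro (⟨⟨a, b⟩, ⟨hm, h⟩, rfl⟩ | ⟨⟨a, b⟩, ⟨hm, h⟩, rfl⟩)
    · exact Or.inl (by simpa [show a = c from by simpa using h] using hm)
    · exact Or.inr (by simpa [show b = c from by simpa using h] using hm)
  · rintro (h | h)
    · exact Or.inl ⟨(c, x), ⟨h, by simp⟩, rfl⟩
    · exact Or.inr ⟨(x, c), ⟨h, by simp⟩, rfl⟩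

-- two Nodup lists with the same members have the same length
theorem pvLen_eq_of_same_mem {α : Type} (s t : List α) (hs : s.Nodup) (ht : t.Nodup)
    (h : ∀ x, x ∈ s ↔ x ∈ t) : PySem.Set.len s = PySem.Set.len t := by
  have : s.Perm t := (List.perm_ext_iff_of_nodup hs ht).mpr h
  simpa [PySem.Set.len] using this.length_eq

theorem isovertwo_spec_list (l : List Char) :
    (let d := (PySem.List.pyRange 0 (l.length : Int)).foldl (pvStepA l) PySem.Dict.empty
     d.keys.all (fun k => !(2 < PySem.Set.len (PySem.Set.ofList (d.getD k [])))))
    = (let edges := l.zip (PySem.List.slice l (some 1) none)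
       (PySem.Set.ofList l).all (fun c =>
         PySem.Set.len (PySem.Set.union
           (PySem.Set.ofList ((edges.filter (fun p => p.1 == c)).map (fun p => p.2)))
           (PySem.Set.ofList ((edges.filter (fun p => p.2 == c)).map (fun p => p.1)))) ≤ 2)) := by
  simp only []
  have hA_getD : ∀ k, ((PySem.List.pyRange 0 (l.length : Int)).foldl (pvStepA l) PySem.Dict.empty).getD k []
      = pvNb none k l := by
    intro k
    rw [PySem.List.pyRange_zero_natCast, pvFoldA_getD]
    have h := pvFlatA_eq_nb l [] k
    simpa using h
  have hAkeys : ∀ k, k ∈ ((PySem.List.pyRange 0 (l.length : Int)).foldl (pvStepA l) PySem.Dict.empty).keys ↔ k ∈ l := by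
    intro k
    rw [PySem.List.pyRange_zero_natCast, pvMem_keys_foldA]
    simp only [PySem.Dict.keys_empty, List.not_mem_nil, false_or]
    constructor
    · rintro ⟨i, hi, hk⟩
      rcases List.mem_map.mp hi with ⟨j, hj, rfl⟩
      rw [PySem.List.pyGet?_natCast, List.getElem?_eq_getElem (List.mem_range.mp hj)] at hk
      rw [← hk]
      exact List.getElem_mem _
    · intro hk
      rcases List.mem_iff_getElem.mp hk with ⟨j, hj, rfl⟩
      refine ⟨(j : Int), List.mem_map_of_mem (List.mem_range.mpr hj), ?_⟩
      rw [PySem.List.pyGet?_natCast, List.getElem?_eq_getElem hj]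
      rfl
  have hlen : ∀ c, PySem.Set.len (PySem.Set.ofList (pvNb none c l))
      = PySem.Set.len (PySem.Set.union
          (PySem.Set.ofList (((l.zip (PySem.List.slice l (some 1) none)).filter (fun p => p.1 == c)).map (fun p => p.2)))
          (PySem.Set.ofList (((l.zip (PySem.List.slice l (some 1) none)).filter (fun p => p.2 == c)).map (fun p => p.1)))) := by
    intro c
    refine pvLen_eq_of_same_mem _ _ (PySem.Set.nodup_ofList _)
      (PySem.Set.nodup_union _ _ (PySem.Set.nodup_ofList _)) (fun x => ?_)
    rw [PySem.Set.mem_ofList, pvMem_nb, PySem.List.slice_from_one, pvMem_bset]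
  rw [Bool.eq_iff_iff, List.all_eq_true, List.all_eq_true]
  constructor
  · intro H c hc
    have := H c ((hAkeys c).mpr ((PySem.Set.mem_ofList _ _).mp hc))
    rw [hA_getD, hlen] at this
    simpa [not_lt] using this
  · intro H k hk
    have := H k ((PySem.Set.mem_ofList _ _).mpr ((hAkeys k).mp hk))
    rw [hA_getD, hlen]
    simpa [not_lt] using this

-- ===== VERDICT (by name: the statement is the Claim_ definition above) =====
theorem isovertwo_spec : Claim_equal_isovertwo := by
  intro s _
  unfold Spec_isovertwo isovertwo isovertwo_alt
  exact isovertwo_spec_list s.toList
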